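-- pv_equiv track=rewrite | github.com/faaaabie/revolve | experiments/EC_C/consolidate_experiments_clauses.py | true_clauses
-- ===== SOURCE A (Python) =====
-- def true_clauses(clauses, env, hardcoded):
--     #function to calculate the number of true clauses
--     n_clauses = 0
--     for i in range(0, len(clauses)):
--         if not hardcoded:
--             if env == 'tilted5':
--                 if 'and' in clauses[i] and 'True' in clauses[i] and 'False' not in clauses[i]:
--                     n_clauses += 1
--                 elif 'or' in clauses[i] and 'True' in clauses[i]:
--                     n_clauses += 1
--                 elif 'True' in clauses[i] and 'and' not in clauses[i] and 'or' not in clauses[i]: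
--                     n_clauses += 1
--             elif env == 'plane':
--                 if 'and' in clauses[i] and 'False' in clauses[i] and 'True' not in clauses[i]:
--                     n_clauses += 1
--                 elif 'or' in clauses[i] and 'False' in clauses[i]:
--                     n_clauses += 1
--                 elif 'Flase' in clauses[i] and 'and' not in clauses[i] and 'or' not in clauses[i]:
--                     n_clauses += 1
--         elif hardcoded:
--             if env == 'tilted5':
--                 if i % 2:
--                     n_clauses += 1
--             elif env == 'plane':
--                 if not i % 2:
--                     n_clauses += 1
--
--     return n_clauses
-- ===== SOURCE B (Python) =====
-- def true_clauses(clauses, env, hardcoded):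
--     # simpler: closed-form parity counts when hardcoded; direct predicate sum otherwise
--     if hardcoded:
--         n = len(clauses)
--         if env == 'tilted5':
--             return n // 2
--         if env == 'plane':
--             return n - n // 2
--         return 0
--     if env == 'tilted5':
--         return sum(1 for c in clauses if
--                    ('and' in c and 'True' in c and 'False' not in c)
--                    or ('or' in c and 'True' in c)
--                    or ('True' in c and 'and' not in c and 'or' not in c))
--     if env == 'plane':
--         return sum(1 for c in clauses if
--                    ('and' in c and 'False' in c and 'True' not in c)
--                    or ('or' in c and 'False' in c)
--                    or ('Flase' in c and 'and' not in c and 'or' not in c))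
--     return 0
-- ===== Notes on version B (the rewrite author's own statement) =====
-- stated objective: simpler
-- what changed: B dispatches on hardcoded first and returns closed-form parity counts (n//2 and n-n//2) instead of looping over indices, and in the non-hardcoded case counts clauses with a single disjunctive predicate instead of A's per-index elif chain.
import Mathlib
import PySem

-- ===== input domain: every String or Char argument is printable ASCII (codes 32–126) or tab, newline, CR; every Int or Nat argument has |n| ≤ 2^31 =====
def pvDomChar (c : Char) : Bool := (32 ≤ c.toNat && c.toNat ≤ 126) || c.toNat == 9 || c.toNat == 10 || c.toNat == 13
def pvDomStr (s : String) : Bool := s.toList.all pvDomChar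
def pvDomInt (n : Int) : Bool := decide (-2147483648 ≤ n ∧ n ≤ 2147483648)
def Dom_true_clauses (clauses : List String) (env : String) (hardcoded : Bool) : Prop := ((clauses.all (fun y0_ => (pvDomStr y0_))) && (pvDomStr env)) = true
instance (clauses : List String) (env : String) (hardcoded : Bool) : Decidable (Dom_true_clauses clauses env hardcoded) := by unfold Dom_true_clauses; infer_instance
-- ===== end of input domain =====

-- B replaces A's index loop by closed-form parity counts (hardcoded) and a direct predicate count (otherwise); objective: simpler.


-- ===== PORT A =====
def true_clauses (clauses : List String) (env : String) (hardcoded : Bool) : Int :=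
  (PySem.List.pyRange 0 (clauses.length : Int) 1).foldl (fun n_clauses i =>
    if !hardcoded then
      if env == "tilted5" then
        let c := PySem.List.pyGetD clauses i ""
        if PySem.Str.isIn "and" c && PySem.Str.isIn "True" c && !PySem.Str.isIn "False" c then
          n_clauses + 1
        else if PySem.Str.isIn "or" c && PySem.Str.isIn "True" c then
          n_clauses + 1
        else if PySem.Str.isIn "True" c && !PySem.Str.isIn "and" c && !PySem.Str.isIn "or" c then
          n_clauses + 1
        else n_clauses
      else if env == "plane" then
        let c := PySem.List.pyGetD clauses i ""
        if PySem.Str.isIn "and" c && PySem.Str.isIn "False" c && !PySem.Str.isIn "True" c then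
          n_clauses + 1
        else if PySem.Str.isIn "or" c && PySem.Str.isIn "False" c then
          n_clauses + 1
        else if PySem.Str.isIn "Flase" c && !PySem.Str.isIn "and" c && !PySem.Str.isIn "or" c then
          n_clauses + 1
        else n_clauses
      else n_clauses
    else
      if env == "tilted5" then
        if PySem.Int.mod i 2 ≠ 0 then n_clauses + 1 else n_clauses
      else if env == "plane" then
        if PySem.Int.mod i 2 = 0 then n_clauses + 1 else n_clauses
      else n_clauses) 0

-- ===== PORT B =====
def predT (c : String) : Bool :=
  (PySem.Str.isIn "and" c && PySem.Str.isIn "True" c && !PySem.Str.isIn "False" c)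
  || (PySem.Str.isIn "or" c && PySem.Str.isIn "True" c)
  || (PySem.Str.isIn "True" c && !PySem.Str.isIn "and" c && !PySem.Str.isIn "or" c)

def predP (c : String) : Bool :=
  (PySem.Str.isIn "and" c && PySem.Str.isIn "False" c && !PySem.Str.isIn "True" c)
  || (PySem.Str.isIn "or" c && PySem.Str.isIn "False" c)
  || (PySem.Str.isIn "Flase" c && !PySem.Str.isIn "and" c && !PySem.Str.isIn "or" c)

def true_clauses_alt (clauses : List String) (env : String) (hardcoded : Bool) : Int :=
  if hardcoded then
    let n : Int := clauses.length
    if env == "tilted5" then PySem.Int.floordiv n 2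
    else if env == "plane" then n - PySem.Int.floordiv n 2
    else 0
  else if env == "tilted5" then (clauses.countP predT : Int)
  else if env == "plane" then (clauses.countP predP : Int)
  else 0

-- ===== PRECONDITION & SPEC =====
def Spec_true_clauses (clauses : List String) (env : String) (hardcoded : Bool) (out : Int) : Prop := out = true_clauses_alt clauses env hardcoded
instance (clauses : List String) (env : String) (hardcoded : Bool) (out : Int) : Decidable (Spec_true_clauses clauses env hardcoded out) := by unfold Spec_true_clauses; infer_instance

-- ===== CLAIM (what is proved, stated in full; the proofs are below) =====
def Claim_equal_true_clauses : Prop := ∀ (clauses : List String) (env : String) (hardcoded : Bool), Dom_true_clauses clauses env hardcoded → Spec_true_clauses clauses env hardcoded (true_clauses clauses env hardcoded)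

-- ===== LEMMAS AND PROOFS =====

-- A's loop over range(0,n) counting odd indices yields n // 2
theorem foldl_odd_count (n : Nat) :
    (PySem.List.pyRange 0 (n : Int) 1).foldl
      (fun a i => if PySem.Int.mod i 2 ≠ 0 then a + 1 else a) 0 = ((n / 2 : Nat) : Int) := by
  induction n with
  | zero => simp [PySem.List.pyRange_one_eq_nil]
  | succ m ih =>
    have h : ((m + 1 : Nat) : Int) = (m : Int) + 1 := by push_cast; ring
    rw [h, PySem.List.pyRange_one_succ_right (by positivity), List.foldl_append, ih]
    have hm : PySem.Int.mod (m : Int) 2 = ((m % 2 : Nat) : Int) := by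
      exact_mod_cast PySem.Int.mod_natCast m 2
    simp only [List.foldl_cons, List.foldl_nil, hm]
    by_cases h2 : m % 2 = 0
    · simp [h2]; omega
    · have h2' : m % 2 = 1 := by omega
      simp [h2']; omega

-- A's loop over range(0,n) counting even indices yields n - n // 2
theorem foldl_even_count (n : Nat) :
    (PySem.List.pyRange 0 (n : Int) 1).foldl
      (fun a i => if PySem.Int.mod i 2 = 0 then a + 1 else a) 0 = ((n - n / 2 : Nat) : Int) := by
  induction n with
  | zero => simp [PySem.List.pyRange_one_eq_nil]
  | succ m ih =>
    have h : ((m + 1 : Nat) : Int) = (m : Int) + 1 := by push_cast; ring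
    rw [h, PySem.List.pyRange_one_succ_right (by positivity), List.foldl_append, ih]
    have hm : PySem.Int.mod (m : Int) 2 = ((m % 2 : Nat) : Int) := by
      exact_mod_cast PySem.Int.mod_natCast m 2
    simp only [List.foldl_cons, List.foldl_nil, hm]
    by_cases h2 : m % 2 = 0
    · simp [h2]; omega
    · have h2' : m % 2 = 1 := by omega
      simp [h2']; omega

-- A's elif chain over a clause equals the single test predT
theorem body_eq_predT :
    (fun (n_clauses : Int) (c : String) =>
      if PySem.Str.isIn "and" c && PySem.Str.isIn "True" c && !PySem.Str.isIn "False" c then n_clauses + 1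
      else if PySem.Str.isIn "or" c && PySem.Str.isIn "True" c then n_clauses + 1
      else if PySem.Str.isIn "True" c && !PySem.Str.isIn "and" c && !PySem.Str.isIn "or" c then n_clauses + 1
      else n_clauses)
      = fun (n_clauses : Int) (c : String) => if predT c then n_clauses + 1 else n_clauses := by
  funext n c
  cases h1 : (PySem.Str.isIn "and" c && PySem.Str.isIn "True" c && !PySem.Str.isIn "False" c) <;>
    cases h2 : (PySem.Str.isIn "or" c && PySem.Str.isIn "True" c) <;>
      cases h3 : (PySem.Str.isIn "True" c && !PySem.Str.isIn "and" c && !PySem.Str.isIn "or" c) <;>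
        simp only [predT, h1, h2, h3, Bool.or_true, Bool.or_false, if_true, if_false,
          Bool.false_eq_true]

-- A's elif chain over a clause equals the single test predP
theorem body_eq_predP :
    (fun (n_clauses : Int) (c : String) =>
      if PySem.Str.isIn "and" c && PySem.Str.isIn "False" c && !PySem.Str.isIn "True" c then n_clauses + 1
      else if PySem.Str.isIn "or" c && PySem.Str.isIn "False" c then n_clauses + 1
      else if PySem.Str.isIn "Flase" c && !PySem.Str.isIn "and" c && !PySem.Str.isIn "or" c then n_clauses + 1
      else n_clauses)
      = fun (n_clauses : Int) (c : String) => if predP c then n_clauses + 1 else n_clauses := by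
  funext n c
  cases h1 : (PySem.Str.isIn "and" c && PySem.Str.isIn "False" c && !PySem.Str.isIn "True" c) <;>
    cases h2 : (PySem.Str.isIn "or" c && PySem.Str.isIn "False" c) <;>
      cases h3 : (PySem.Str.isIn "Flase" c && !PySem.Str.isIn "and" c && !PySem.Str.isIn "or" c) <;>
        simp only [predP, h1, h2, h3, Bool.or_true, Bool.or_false, if_true, if_false,
          Bool.false_eq_true]

theorem true_clauses_nonhard_tilted (clauses : List String) :
    true_clauses clauses "tilted5" false = (clauses.countP predT : Int) := by
  unfold true_clauses
  simp only [Bool.not_false, BEq.rfl, if_true]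
  rw [PySem.List.foldl_pyRange_zero_pyGetD' clauses ""
    (fun (n_clauses : Int) (c : String) =>
      if PySem.Str.isIn "and" c && PySem.Str.isIn "True" c && !PySem.Str.isIn "False" c then n_clauses + 1
      else if PySem.Str.isIn "or" c && PySem.Str.isIn "True" c then n_clauses + 1
      else if PySem.Str.isIn "True" c && !PySem.Str.isIn "and" c && !PySem.Str.isIn "or" c then n_clauses + 1
      else n_clauses) 0]
  rw [body_eq_predT, PySem.List.foldl_if_add_one]
  simp

theorem true_clauses_nonhard_plane (clauses : List String) :
    true_clauses clauses "plane" false = (clauses.countP predP : Int) := by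
  unfold true_clauses
  simp only [Bool.not_false, BEq.rfl, if_true]
  rw [show (("plane" == "tilted5") = false) from rfl]
  simp only [Bool.false_eq_true, if_false]
  rw [PySem.List.foldl_pyRange_zero_pyGetD' clauses ""
    (fun (n_clauses : Int) (c : String) =>
      if PySem.Str.isIn "and" c && PySem.Str.isIn "False" c && !PySem.Str.isIn "True" c then n_clauses + 1
      else if PySem.Str.isIn "or" c && PySem.Str.isIn "False" c then n_clauses + 1
      else if PySem.Str.isIn "Flase" c && !PySem.Str.isIn "and" c && !PySem.Str.isIn "or" c then n_clauses + 1
      else n_clauses) 0]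
  rw [body_eq_predP, PySem.List.foldl_if_add_one]
  simp

-- ===== VERDICT (by name: the statement is the Claim_ definition above) =====
theorem true_clauses_spec : Claim_equal_true_clauses := by
  intro clauses env hardcoded _
  unfold Spec_true_clauses true_clauses_alt
  have hflo : PySem.Int.floordiv (clauses.length : Int) 2 = ((clauses.length / 2 : Nat) : Int) := by
    exact_mod_cast PySem.Int.floordiv_natCast clauses.length 2
  cases hardcoded with
  | false =>
    by_cases ht : env = "tilted5"
    · subst ht; simpa using true_clauses_nonhard_tilted clauses
    · by_cases hp : env = "plane"
      · subst hp; simpa using true_clauses_nonhard_plane clauses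
      · have ht' : (env == "tilted5") = false := by simp [ht]
        have hp' : (env == "plane") = false := by simp [hp]
        unfold true_clauses
        simp only [ht', hp', Bool.not_false, Bool.false_eq_true, if_false, if_true]
        exact List.foldl_fixed' (fun b => rfl) _
  | true =>
    unfold true_clauses
    by_cases ht : env = "tilted5"
    · subst ht
      simp only [Bool.not_true, Bool.false_eq_true, if_false, BEq.rfl, if_true]
      rw [foldl_odd_count, hflo]
    · by_cases hp : env = "plane"
      · subst hp
        simp only [show (("plane" == "tilted5") = false) from rfl, Bool.not_true,
          Bool.false_eq_true, if_false, BEq.rfl, if_true]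
        rw [foldl_even_count, hflo]
        omega
      · have ht' : (env == "tilted5") = false := by simp [ht]
        have hp' : (env == "plane") = false := by simp [hp]
        simp only [ht', hp', Bool.not_true, Bool.false_eq_true, if_false, if_true]
        exact List.foldl_fixed' (fun b => rfl) _
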